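-- pv_equiv track=rewrite | github.com/DeadCoder-N/root | security-toolkit/tool-05-jwt-analyzer/backend/app.py | add_fix_prompts
-- ===== SOURCE A (Python) =====
-- def add_fix_prompts(vulnerabilities):
--     """Add actionable fix prompts to vulnerabilities"""
--     for vuln in vulnerabilities:
--         vuln_type = vuln.get('type', '')
--
--         if 'Algorithm None' in vuln_type:
--             vuln['fix_prompt'] = "Reject tokens with 'none' algorithm. Whitelist allowed algorithms (HS256, RS256, ES256). Never accept unsigned tokens."
--         elif 'Weak Secret' in vuln_type:
--             vuln['fix_prompt'] = "Generate strong secret: openssl rand -base64 32. Rotate immediately. Use minimum 256-bit secrets. Store in environment variables."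
--         elif 'Expiration' in vuln_type:
--             vuln['fix_prompt'] = "Add 'exp' claim with 15-60 min lifetime for access tokens. Implement refresh tokens for longer sessions. Reject expired tokens."
--         elif 'Algorithm Confusion' in vuln_type:
--             vuln['fix_prompt'] = "Strictly validate algorithm. Never accept HS256 for RS256 tokens. Bind algorithm to key type. Use algorithm whitelist."
--         elif 'Missing Signature' in vuln_type:
--             vuln['fix_prompt'] = "All JWTs must be signed. Use HS256 (symmetric) or RS256 (asymmetric). Verify signature on every request."
--         elif 'Sensitive Data' in vuln_type:
--             vuln['fix_prompt'] = "Never store passwords, secrets, or PII in JWT payload. JWTs are base64-encoded, not encrypted. Use encrypted tokens if needed."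
--         elif 'Key ID' in vuln_type or 'kid' in vuln_type:
--             vuln['fix_prompt'] = "Sanitize kid parameter. Use whitelist of allowed key IDs. Prevent path traversal and SQL injection in kid."
--         else:
--             vuln['fix_prompt'] = f"Review and fix {vuln_type}. Follow JWT best practices: jwt.io/introduction"
--
--     return vulnerabilities
-- ===== SOURCE B (Python) =====
-- RULES = [
--     (("Algorithm None",), "Reject tokens with 'none' algorithm. Whitelist allowed algorithms (HS256, RS256, ES256). Never accept unsigned tokens."),
--     (("Weak Secret",), "Generate strong secret: openssl rand -base64 32. Rotate immediately. Use minimum 256-bit secrets. Store in environment variables."),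
--     (("Expiration",), "Add 'exp' claim with 15-60 min lifetime for access tokens. Implement refresh tokens for longer sessions. Reject expired tokens."),
--     (("Algorithm Confusion",), "Strictly validate algorithm. Never accept HS256 for RS256 tokens. Bind algorithm to key type. Use algorithm whitelist."),
--     (("Missing Signature",), "All JWTs must be signed. Use HS256 (symmetric) or RS256 (asymmetric). Verify signature on every request."),
--     (("Sensitive Data",), "Never store passwords, secrets, or PII in JWT payload. JWTs are base64-encoded, not encrypted. Use encrypted tokens if needed."),
--     (("Key ID", "kid"), "Sanitize kid parameter. Use whitelist of allowed key IDs. Prevent path traversal and SQL injection in kid."),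
-- ]
--
--
-- def add_fix_prompts(vulnerabilities):
--     """Add actionable fix prompts to vulnerabilities (rule-major staged passes).
--
--     Every record starts with the default prompt; then each rule, swept in
--     reverse precedence order over all records, overwrites the prompt of the
--     records it matches, so the highest-precedence matching rule wins last.
--     """
--     prompts = [f"Review and fix {v.get('type', '')}. Follow JWT best practices: jwt.io/introduction"
--                for v in vulnerabilities]
--     for triggers, prompt in reversed(RULES):
--         for i, v in enumerate(vulnerabilities):
--             if any(t in v.get('type', '') for t in triggers):
--                 prompts[i] = prompt
--     for v, p in zip(vulnerabilities, prompts):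
--         v['fix_prompt'] = p
--     return vulnerabilities
-- ===== Notes on version B (the rewrite author's own statement) =====
-- stated objective: alternative
-- what changed: Replaces A's per-record first-match if/elif scan by rule-major staged passes: a parallel prompts array is initialised with defaults and each rule, iterated in reverse precedence order over all records, overwrites the prompts of matching records, so the highest-precedence match wins last.
import Mathlib
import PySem

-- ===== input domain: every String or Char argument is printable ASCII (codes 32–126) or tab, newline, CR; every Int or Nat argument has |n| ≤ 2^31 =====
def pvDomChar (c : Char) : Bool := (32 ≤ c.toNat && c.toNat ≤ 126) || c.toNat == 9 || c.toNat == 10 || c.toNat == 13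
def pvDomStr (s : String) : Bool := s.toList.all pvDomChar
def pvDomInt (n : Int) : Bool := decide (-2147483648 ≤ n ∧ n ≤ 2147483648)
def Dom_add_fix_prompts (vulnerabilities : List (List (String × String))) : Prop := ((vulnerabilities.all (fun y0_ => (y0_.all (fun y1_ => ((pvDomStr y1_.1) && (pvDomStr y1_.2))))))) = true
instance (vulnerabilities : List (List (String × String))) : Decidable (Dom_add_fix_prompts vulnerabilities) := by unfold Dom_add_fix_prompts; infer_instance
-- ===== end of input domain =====

-- B replaces A's per-record first-match if/elif scan with rule-major staged passes:
-- defaults first, then each rule in reverse precedence order overwrites the prompts of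
-- the records it matches (objective: alternative). A mutates the dicts in place; the
-- ports model dicts as assoc lists and the equivalence is about the returned value.

-- ===== PORT A =====
-- one iteration of A's loop body on one vuln dict
def pvFixA (vuln : PySem.Dict String String) : PySem.Dict String String :=
  let vuln_type := vuln.getD "type" ""
  if PySem.Str.isIn "Algorithm None" vuln_type then
    vuln.insert "fix_prompt" "Reject tokens with 'none' algorithm. Whitelist allowed algorithms (HS256, RS256, ES256). Never accept unsigned tokens."
  else if PySem.Str.isIn "Weak Secret" vuln_type then
    vuln.insert "fix_prompt" "Generate strong secret: openssl rand -base64 32. Rotate immediately. Use minimum 256-bit secrets. Store in environment variables."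
  else if PySem.Str.isIn "Expiration" vuln_type then
    vuln.insert "fix_prompt" "Add 'exp' claim with 15-60 min lifetime for access tokens. Implement refresh tokens for longer sessions. Reject expired tokens."
  else if PySem.Str.isIn "Algorithm Confusion" vuln_type then
    vuln.insert "fix_prompt" "Strictly validate algorithm. Never accept HS256 for RS256 tokens. Bind algorithm to key type. Use algorithm whitelist."
  else if PySem.Str.isIn "Missing Signature" vuln_type then
    vuln.insert "fix_prompt" "All JWTs must be signed. Use HS256 (symmetric) or RS256 (asymmetric). Verify signature on every request."
  else if PySem.Str.isIn "Sensitive Data" vuln_type then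
    vuln.insert "fix_prompt" "Never store passwords, secrets, or PII in JWT payload. JWTs are base64-encoded, not encrypted. Use encrypted tokens if needed."
  else if PySem.Str.isIn "Key ID" vuln_type || PySem.Str.isIn "kid" vuln_type then
    vuln.insert "fix_prompt" "Sanitize kid parameter. Use whitelist of allowed key IDs. Prevent path traversal and SQL injection in kid."
  else
    vuln.insert "fix_prompt" ("Review and fix " ++ vuln_type ++ ". Follow JWT best practices: jwt.io/introduction")

def add_fix_prompts (vulnerabilities : List (List (String × String))) : List (List (String × String)) :=
  vulnerabilities.map (fun v => (pvFixA (PySem.Dict.mk v)).items)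

-- ===== PORT B =====
-- the ordered rule table RULES of Source B: (trigger substrings, prompt)
def pvRules : List (List String × String) :=
  [ (["Algorithm None"], "Reject tokens with 'none' algorithm. Whitelist allowed algorithms (HS256, RS256, ES256). Never accept unsigned tokens."),
    (["Weak Secret"], "Generate strong secret: openssl rand -base64 32. Rotate immediately. Use minimum 256-bit secrets. Store in environment variables."),
    (["Expiration"], "Add 'exp' claim with 15-60 min lifetime for access tokens. Implement refresh tokens for longer sessions. Reject expired tokens."),
    (["Algorithm Confusion"], "Strictly validate algorithm. Never accept HS256 for RS256 tokens. Bind algorithm to key type. Use algorithm whitelist."),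
    (["Missing Signature"], "All JWTs must be signed. Use HS256 (symmetric) or RS256 (asymmetric). Verify signature on every request."),
    (["Sensitive Data"], "Never store passwords, secrets, or PII in JWT payload. JWTs are base64-encoded, not encrypted. Use encrypted tokens if needed."),
    (["Key ID", "kid"], "Sanitize kid parameter. Use whitelist of allowed key IDs. Prevent path traversal and SQL injection in kid.") ]

-- Source B: prompts starts as defaults; each reversed rule overwrites prompts[i] of the
-- records it matches ('for i, v in enumerate' ported as a zip with the prompts list);
-- finally each vuln gets its prompt assigned.
def add_fix_prompts_alt (vulnerabilities : List (List (String × String))) : List (List (String × String)) :=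
  let prompts := vulnerabilities.map (fun v =>
    "Review and fix " ++ ((PySem.Dict.mk v).getD "type" "") ++ ". Follow JWT best practices: jwt.io/introduction")
  let prompts := pvRules.reverse.foldl (fun ps r =>
    (vulnerabilities.zip ps).map (fun vp =>
      if r.1.any (fun t => PySem.Str.isIn t ((PySem.Dict.mk vp.1).getD "type" "")) then r.2 else vp.2)) prompts
  (vulnerabilities.zip prompts).map (fun vp => ((PySem.Dict.mk vp.1).insert "fix_prompt" vp.2).items)

-- ===== PRECONDITION & SPEC =====
def Spec_add_fix_prompts (vulnerabilities : List (List (String × String))) (out : List (List (String × String))) : Prop := out = add_fix_prompts_alt vulnerabilities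
instance (vulnerabilities : List (List (String × String))) (out : List (List (String × String))) : Decidable (Spec_add_fix_prompts vulnerabilities out) := by unfold Spec_add_fix_prompts; infer_instance

-- ===== CLAIM =====
def Claim_equal_add_fix_prompts : Prop := ∀ (vulnerabilities : List (List (String × String))), Dom_add_fix_prompts vulnerabilities → Spec_add_fix_prompts vulnerabilities (add_fix_prompts vulnerabilities)

-- ===== LEMMAS AND PROOFS =====
-- zipping a list with a map of itself and mapping reduces to a single map
theorem zip_map_self {α β γ : Type} (vs : List α) (h : α → β) (F : α × β → γ) :
    ((vs.zip (vs.map h)).map F) = vs.map (fun v => F (v, h v)) := by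
  induction vs with
  | nil => rfl
  | cons a t ih => simp [ih]

-- the rule-major fold over per-element updates equals a per-element fold
theorem fold_rules_map {α β : Type} (rs : List (List String × String)) (vs : List α)
    (h : α → β) (upd : (List String × String) → α → β → β) :
    rs.foldl (fun ps r => (vs.zip ps).map (fun vp => upd r vp.1 vp.2)) (vs.map h)
      = vs.map (fun v => rs.foldl (fun p r => upd r v p) (h v)) := by
  induction rs generalizing h with
  | nil => rfl
  | cons r t ih =>
      simp only [List.foldl_cons, zip_map_self]
      exact ih (fun v => upd r v (h v))

-- the per-element reverse-precedence fold of B equals A's if/elif chain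
theorem pvFix_elem (d : PySem.Dict String String) :
    pvFixA d = d.insert "fix_prompt"
      (pvRules.reverse.foldl
        (fun p r => if r.1.any (fun t => PySem.Str.isIn t (d.getD "type" "")) then r.2 else p)
        ("Review and fix " ++ (d.getD "type" "") ++ ". Follow JWT best practices: jwt.io/introduction")) := by
  unfold pvFixA pvRules
  simp only [List.reverse_cons, List.reverse_nil, List.nil_append, List.cons_append,
    List.foldl_cons, List.foldl_nil, List.any_cons, List.any_nil, Bool.or_false]
  split_ifs <;> simp_all

-- ===== VERDICT =====
theorem add_fix_prompts_spec : Claim_equal_add_fix_prompts := by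
  intro vs _
  unfold Spec_add_fix_prompts add_fix_prompts add_fix_prompts_alt
  simp only []
  rw [fold_rules_map (upd := fun r v p =>
    if r.1.any (fun t => PySem.Str.isIn t ((PySem.Dict.mk v).getD "type" "")) then r.2 else p)]
  rw [zip_map_self]
  simp [pvFix_elem]
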